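-- pv_equiv track=rewrite | github.com/imezx/luau-bench | luau_bench/evaluator.py | _resolve_primary_key
-- ===== SOURCE A (Python) =====
-- from typing import Any, Optional
--
-- _PRIMARY_SUFFIXES: tuple[str, ...] = ("_pass_rate", "_clean_rate", "_acc")
--
-- def _resolve_primary_key(spec_name: str, metric_keys: set[str]) -> Optional[str]:
--     if spec_name in metric_keys:
--         return spec_name
--     for suffix in _PRIMARY_SUFFIXES:
--         if (candidate := spec_name + suffix) in metric_keys:
--             return candidate
--     for key in sorted(metric_keys):
--         if key.startswith(spec_name):
--             return key
--     return None
-- ===== SOURCE B (Python) =====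
-- from typing import Optional
--
-- _PRIMARY_SUFFIXES: tuple[str, ...] = ("_pass_rate", "_clean_rate", "_acc")
--
-- def _resolve_primary_key(spec_name: str, metric_keys: set[str]) -> Optional[str]:
--     # Single pass: record which exact/suffix candidates are present and the
--     # lexicographically smallest key starting with spec_name, then pick by priority.
--     c1 = spec_name + _PRIMARY_SUFFIXES[0]
--     c2 = spec_name + _PRIMARY_SUFFIXES[1]
--     c3 = spec_name + _PRIMARY_SUFFIXES[2]
--     exact = s1 = s2 = s3 = False
--     best: Optional[str] = None
--     for key in metric_keys:
--         if key == spec_name: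
--             exact = True
--         elif key == c1:
--             s1 = True
--         elif key == c2:
--             s2 = True
--         elif key == c3:
--             s3 = True
--         if key.startswith(spec_name) and (best is None or key < best):
--             best = key
--     if exact:
--         return spec_name
--     if s1:
--         return c1
--     if s2:
--         return c2
--     if s3:
--         return c3
--     return best
-- ===== Notes on version B (the rewrite author's own statement) =====
-- stated objective: alternative
-- what changed: Replaces A's three sequential stages (membership test, suffix probes, sort-then-scan for the first prefix match) with a single linear pass over metric_keys that records which exact/suffix candidates are present and tracks the lexicographically smallest key starting with spec_name, then picks by priority; no sort is performed.
import Mathlib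
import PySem

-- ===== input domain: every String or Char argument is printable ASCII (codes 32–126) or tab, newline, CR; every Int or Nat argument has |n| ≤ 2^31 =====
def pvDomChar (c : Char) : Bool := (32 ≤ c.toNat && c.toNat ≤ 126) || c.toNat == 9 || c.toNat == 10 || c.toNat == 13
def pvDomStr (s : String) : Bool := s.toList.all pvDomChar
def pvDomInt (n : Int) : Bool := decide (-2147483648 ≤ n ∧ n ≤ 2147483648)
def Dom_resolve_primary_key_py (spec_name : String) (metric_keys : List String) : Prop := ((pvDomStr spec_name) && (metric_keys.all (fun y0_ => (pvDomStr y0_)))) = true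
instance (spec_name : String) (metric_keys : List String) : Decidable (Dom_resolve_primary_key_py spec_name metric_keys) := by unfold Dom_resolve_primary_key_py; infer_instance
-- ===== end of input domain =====

-- B replaces A's suffix probes + sort-then-scan with one linear pass (candidate flags + running min of prefix matches); no sort is performed.


-- ===== PORT A =====
-- _PRIMARY_SUFFIXES
def pvPrimarySuffixes : List String := ["_pass_rate", "_clean_rate", "_acc"]

-- 'for suffix in _PRIMARY_SUFFIXES: if (candidate := spec_name + suffix) in metric_keys: return candidate'
def pvSuffixLoop (spec_name : String) (metric_keys : List String) : List String → Option String
  | [] => none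
  | suf :: rest =>
    let candidate := spec_name ++ suf
    if metric_keys.contains candidate then some candidate
    else pvSuffixLoop spec_name metric_keys rest

-- 'for key in <keys>: if key.startswith(spec_name): return key'
def pvPrefixScan (spec_name : String) : List String → Option String
  | [] => none
  | k :: rest =>
    if PySem.Str.startswith k spec_name then some k
    else pvPrefixScan spec_name rest

def resolve_primary_key_py (spec_name : String) (metric_keys : List String) : Option String :=
  if metric_keys.contains spec_name then some spec_name
  else
    match pvSuffixLoop spec_name metric_keys pvPrimarySuffixes with
    | some c => some c
    | none => pvPrefixScan spec_name (PySem.List.sorted metric_keys (fun x => x) false)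

-- ===== PORT B =====
-- one step of B's single loop; state = (exact, s1, s2, s3, best)
def pvStep (spec_name c1 c2 c3 : String)
    (st : Bool × Bool × Bool × Bool × Option String) (key : String) :
    Bool × Bool × Bool × Bool × Option String :=
  let st1 :=
    if key = spec_name then (true, st.2.1, st.2.2.1, st.2.2.2.1, st.2.2.2.2)
    else if key = c1 then (st.1, true, st.2.2.1, st.2.2.2.1, st.2.2.2.2)
    else if key = c2 then (st.1, st.2.1, true, st.2.2.2.1, st.2.2.2.2)
    else if key = c3 then (st.1, st.2.1, st.2.2.1, true, st.2.2.2.2)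
    else st
  if PySem.Str.startswith key spec_name &&
      (st1.2.2.2.2.elim true (fun b => decide (key < b))) then
    (st1.1, st1.2.1, st1.2.2.1, st1.2.2.2.1, some key)
  else st1

def resolve_primary_key_py_alt (spec_name : String) (metric_keys : List String) : Option String :=
  let c1 := spec_name ++ "_pass_rate"
  let c2 := spec_name ++ "_clean_rate"
  let c3 := spec_name ++ "_acc"
  let st := metric_keys.foldl (pvStep spec_name c1 c2 c3) (false, false, false, false, none)
  if st.1 then some spec_name
  else if st.2.1 then some c1
  else if st.2.2.1 then some c2
  else if st.2.2.2.1 then some c3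
  else st.2.2.2.2

-- ===== PRECONDITION & SPEC =====
def Spec_resolve_primary_key_py (spec_name : String) (metric_keys : List String) (out : Option String) : Prop := out = resolve_primary_key_py_alt spec_name metric_keys
instance (spec_name : String) (metric_keys : List String) (out : Option String) : Decidable (Spec_resolve_primary_key_py spec_name metric_keys out) := by unfold Spec_resolve_primary_key_py; infer_instance

-- ===== CLAIM (what is proved, stated in full; the proofs are below) =====
def Claim_equal_resolve_primary_key_py : Prop := ∀ (spec_name : String) (metric_keys : List String), Dom_resolve_primary_key_py spec_name metric_keys → Spec_resolve_primary_key_py spec_name metric_keys (resolve_primary_key_py spec_name metric_keys)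

-- ===== LEMMAS AND PROOFS =====

-- the prefix test and the running-min step of B's loop, named for the proofs
def pvP (s k : String) : Bool := PySem.Str.startswith k s

def pvOm (s : String) (b : Option String) (k : String) : Option String :=
  if pvP s k && (b.elim true (fun x => decide (k < x))) then some k else b

-- appending distinct suffixes gives distinct strings
theorem pv_app_ne {s t u : String} (h : t ≠ u) : s ++ t ≠ s ++ u := by
  intro he
  have h2 := congrArg String.toList he
  simp at h2
  exact h (String.toList_inj.mp h2)

theorem pv_ne_app {s t : String} (h : t ≠ "") : s ++ t ≠ s := by
  intro he
  have h2 := congrArg String.toList he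
  simp at h2
  exact h h2

theorem pvBeqComm (a b : String) : (a == b) = (b == a) := by
  by_cases h : a = b
  · subst h; rfl
  · have h' : ¬ b = a := fun e => h e.symm
    simp [h, h']

-- components of one step of B's loop
theorem pvStep_fst (s c1 c2 c3 : String) (st : Bool × Bool × Bool × Bool × Option String)
    (k : String) : (pvStep s c1 c2 c3 st k).1 = (st.1 || (k == s)) := by
  unfold pvStep
  split_ifs <;> dsimp only <;> split <;> simp_all

theorem pvStep_s1 (s c1 c2 c3 : String) (h1 : c1 ≠ s)
    (st : Bool × Bool × Bool × Bool × Option String) (k : String) :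
    (pvStep s c1 c2 c3 st k).2.1 = (st.2.1 || (k == c1)) := by
  unfold pvStep
  split_ifs <;> dsimp only <;> split <;> simp_all <;>
    (try (intro he; subst he; simp_all))

theorem pvStep_s2 (s c1 c2 c3 : String) (h2 : c2 ≠ s) (h21 : c2 ≠ c1)
    (st : Bool × Bool × Bool × Bool × Option String) (k : String) :
    (pvStep s c1 c2 c3 st k).2.2.1 = (st.2.2.1 || (k == c2)) := by
  unfold pvStep
  split_ifs <;> dsimp only <;> split <;> simp_all <;>
    (try (intro he; subst he; simp_all))

theorem pvStep_s3 (s c1 c2 c3 : String) (h3 : c3 ≠ s) (h31 : c3 ≠ c1) (h32 : c3 ≠ c2)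
    (st : Bool × Bool × Bool × Bool × Option String) (k : String) :
    (pvStep s c1 c2 c3 st k).2.2.2.1 = (st.2.2.2.1 || (k == c3)) := by
  unfold pvStep
  split_ifs <;> dsimp only <;> split <;> simp_all <;>
    (try (intro he; subst he; simp_all))

theorem pvStep_best (s c1 c2 c3 : String) (st : Bool × Bool × Bool × Bool × Option String)
    (k : String) : (pvStep s c1 c2 c3 st k).2.2.2.2 = pvOm s st.2.2.2.2 k := by
  unfold pvStep pvOm pvP
  split_ifs <;> dsimp only <;> split <;> simp_all

-- projections of B's whole fold
theorem pvFold_proj (s c1 c2 c3 : String) (h1 : c1 ≠ s) (h2 : c2 ≠ s) (h3 : c3 ≠ s)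
    (h21 : c2 ≠ c1) (h31 : c3 ≠ c1) (h32 : c3 ≠ c2) :
    ∀ (l : List String) (st : Bool × Bool × Bool × Bool × Option String),
      l.foldl (pvStep s c1 c2 c3) st =
        (st.1 || l.contains s, st.2.1 || l.contains c1, st.2.2.1 || l.contains c2,
         st.2.2.2.1 || l.contains c3, l.foldl (pvOm s) st.2.2.2.2) := by
  intro l
  induction l with
  | nil => intro st; simp
  | cons k t ih =>
    intro st
    have := ih (pvStep s c1 c2 c3 st k)
    rw [List.foldl_cons, this, pvStep_fst, pvStep_s1 s c1 c2 c3 h1,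
      pvStep_s2 s c1 c2 c3 h2 h21, pvStep_s3 s c1 c2 c3 h3 h31 h32,
      pvStep_best]
    simp only [List.contains_cons, Bool.or_assoc]
    rw [pvBeqComm k s, pvBeqComm k c1, pvBeqComm k c2, pvBeqComm k c3, List.foldl_cons]

-- one running-min step on a non-empty accumulator
theorem pvOm_step (s x k : String) :
    pvOm s (some x) k = if pvP s k then some (min x k) else some x := by
  unfold pvOm
  rcases lt_or_ge k x with h | h
  · have h' : k.toList < x.toList := String.lt_iff_toList_lt.mp h
    have hm : min x k = k := min_eq_right h.le
    by_cases hp : pvP s k <;> simp [hp, h', hm]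
  · have h' : ¬ k.toList < x.toList := fun hc => absurd (String.lt_iff_toList_lt.mpr hc) (not_lt.mpr h)
    have hm : min x k = x := min_eq_left h
    by_cases hp : pvP s k <;> simp [hp, h', hm]

-- the running min over a list as min of the filtered list
theorem pvOm_some (s : String) : ∀ (l : List String) (x : String),
    l.foldl (pvOm s) (some x) = some (((l.filter (pvP s)).foldl min x)) := by
  intro l
  induction l with
  | nil => intro x; simp
  | cons k t ih =>
    intro x
    rw [List.foldl_cons, pvOm_step]
    by_cases hp : pvP s k
    · rw [if_pos hp, List.filter_cons_of_pos hp, List.foldl_cons, ih]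
    · rw [if_neg hp, List.filter_cons_of_neg (by simp [hp]), ih]

theorem pvOm_none_step (s k : String) :
    pvOm s none k = if pvP s k then some k else none := by
  unfold pvOm
  by_cases hp : pvP s k <;> simp [hp]

theorem pvOm_none (s : String) : ∀ (l : List String),
    l.foldl (pvOm s) none = PySem.List.min? (l.filter (pvP s)) (fun y => y) := by
  intro l
  induction l with
  | nil => simp [PySem.List.min?]
  | cons k t ih =>
    rw [List.foldl_cons, pvOm_none_step]
    by_cases hp : pvP s k
    · rw [if_pos hp, List.filter_cons_of_pos hp, PySem.List.min?_id_cons, pvOm_some]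
    · rw [if_neg hp, List.filter_cons_of_neg (by simp [hp]), ih]

-- characterisation of A's prefix scan
theorem pvScan_none (s : String) : ∀ (l : List String),
    pvPrefixScan s l = none ↔ ∀ k ∈ l, pvP s k = false := by
  intro l
  induction l with
  | nil => simp [pvPrefixScan]
  | cons k t ih =>
    simp only [pvPrefixScan]
    by_cases hp : pvP s k
    · rw [if_pos (show PySem.Str.startswith k s = true from hp)]
      constructor
      · intro h; simp at h
      · intro h
        have hk := h k List.mem_cons_self
        rw [hp] at hk; cases hk
    · rw [if_neg (show ¬ PySem.Str.startswith k s = true from hp), ih]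
      constructor
      · intro h y hy
        rcases List.mem_cons.mp hy with rfl | hy'
        · exact Bool.eq_false_iff.mpr hp
        · exact h y hy'
      · intro h y hy; exact h y (List.mem_cons_of_mem _ hy)

theorem pvScan_some (s : String) : ∀ (l : List String) (m : String),
    pvPrefixScan s l = some m → m ∈ l ∧ pvP s m = true := by
  intro l
  induction l with
  | nil => intro m h; simp [pvPrefixScan] at h
  | cons k t ih =>
    intro m h
    simp only [pvPrefixScan] at h
    by_cases hp : pvP s k
    · rw [if_pos (show PySem.Str.startswith k s = true from hp)] at h
      cases h
      exact ⟨List.mem_cons_self, hp⟩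
    · rw [if_neg (show ¬ PySem.Str.startswith k s = true from hp)] at h
      obtain ⟨hm, hpm⟩ := ih m h
      exact ⟨List.mem_cons_of_mem _ hm, hpm⟩

theorem pvScan_min (s : String) : ∀ (l : List String), l.Pairwise (· ≤ ·) →
    ∀ (m : String), pvPrefixScan s l = some m → ∀ y ∈ l, pvP s y = true → m ≤ y := by
  intro l
  induction l with
  | nil => intro _ m h; simp [pvPrefixScan] at h
  | cons k t ih =>
    intro hpw m h y hy hpy
    have hk := (List.pairwise_cons.mp hpw).1
    have ht := (List.pairwise_cons.mp hpw).2
    simp only [pvPrefixScan] at h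
    by_cases hp : pvP s k
    · rw [if_pos (show PySem.Str.startswith k s = true from hp)] at h
      cases h
      rcases List.mem_cons.mp hy with rfl | hy'
      · exact le_refl _
      · exact hk y hy'
    · rw [if_neg (show ¬ PySem.Str.startswith k s = true from hp)] at h
      rcases List.mem_cons.mp hy with rfl | hy'
      · rw [Bool.eq_false_iff.mpr hp] at hpy; cases hpy
      · exact ih ht m h y hy' hpy

-- A's whole prefix stage equals B's running min
theorem pvStage3 (s : String) (l : List String) :
    pvPrefixScan s (PySem.List.sorted l (fun x => x) false) =
      PySem.List.min? (l.filter (pvP s)) (fun y => y) := by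
  have hperm : (PySem.List.sorted l (fun x => x) false).Perm l := PySem.List.sorted_perm ..
  have hpw : (PySem.List.sorted l (fun x => x) false).Pairwise (· ≤ ·) :=
    PySem.List.sorted_pairwise ..
  cases hscan : pvPrefixScan s (PySem.List.sorted l (fun x => x) false) with
  | none =>
    have hall := (pvScan_none s _).mp hscan
    have : l.filter (pvP s) = [] := by
      rw [List.filter_eq_nil_iff]
      intro a ha
      simpa using hall a (hperm.mem_iff.mpr ha)
    rw [this]
    simp [PySem.List.min?]
  | some m =>
    obtain ⟨hm, hpm⟩ := pvScan_some s _ m hscan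
    have hminA := pvScan_min s _ hpw m hscan
    have hmF : m ∈ l.filter (pvP s) := List.mem_filter.mpr ⟨hperm.mem_iff.mp hm, hpm⟩
    cases hmin : PySem.List.min? (l.filter (pvP s)) (fun y => y) with
    | none =>
      rw [PySem.List.min?_eq_none_iff] at hmin
      rw [hmin] at hmF
      simp at hmF
    | some m' =>
      have hm'F : m' ∈ l.filter (pvP s) := PySem.List.min?_mem hmin
      have h1 : m ≤ m' := by
        have := List.mem_filter.mp hm'F
        exact hminA m' (hperm.mem_iff.mpr this.1) this.2
      have h2 : m' ≤ m := PySem.List.min?_isMin hmin m hmF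
      rw [le_antisymm h1 h2]

-- ===== VERDICT (by name: the statement is the Claim_ definition above) =====
theorem resolve_primary_key_py_spec : Claim_equal_resolve_primary_key_py := by
  intro s l _
  unfold Spec_resolve_primary_key_py resolve_primary_key_py resolve_primary_key_py_alt
  have hne1 : (s ++ "_pass_rate") ≠ s := pv_ne_app (by decide)
  have hne2 : (s ++ "_clean_rate") ≠ s := pv_ne_app (by decide)
  have hne3 : (s ++ "_acc") ≠ s := pv_ne_app (by decide)
  have h21 : (s ++ "_clean_rate") ≠ (s ++ "_pass_rate") := pv_app_ne (by decide)
  have h31 : (s ++ "_acc") ≠ (s ++ "_pass_rate") := pv_app_ne (by decide)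
  have h32 : (s ++ "_acc") ≠ (s ++ "_clean_rate") := pv_app_ne (by decide)
  dsimp only
  rw [pvFold_proj s _ _ _ hne1 hne2 hne3 h21 h31 h32 l (false, false, false, false, none)]
  simp only [pvSuffixLoop, pvPrimarySuffixes, Bool.false_or]
  rw [pvOm_none, ← pvStage3]
  by_cases h0 : s ∈ l <;> by_cases hc1 : (s ++ "_pass_rate") ∈ l <;>
    by_cases hc2 : (s ++ "_clean_rate") ∈ l <;>
    by_cases hc3 : (s ++ "_acc") ∈ l <;>
    simp [h0, hc1, hc2, hc3]
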